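-- pv_equiv track=rewrite | github.com/SherMM/rosalind-python | entropy.py | pseudoCount
-- ===== SOURCE A (Python) =====
-- def pseudoCount(matrix):
-- 	columns = zip(*matrix)
-- 	counts = {'A':[], 'C':[], 'G':[], 'T':[]}
-- 	for col in columns:
-- 		for letter in counts.keys():
-- 			col_count = sum([col.count(letter), col.count(letter.lower())])
-- 			counts[letter] = counts.get(letter, []) + [col_count + 1]
-- 	return counts
-- ===== SOURCE B (Python) =====
-- def pseudoCount(matrix):
--     ncols = min((len(row) for row in matrix), default=0)
--     a = [1] * ncols
--     c = [1] * ncols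
--     g = [1] * ncols
--     t = [1] * ncols
--     for row in matrix:
--         for j in range(ncols):
--             ch = row[j]
--             if ch in 'Aa':
--                 a[j] += 1
--             elif ch in 'Cc':
--                 c[j] += 1
--             elif ch in 'Gg':
--                 g[j] += 1
--             elif ch in 'Tt':
--                 t[j] += 1
--     return {'A': a, 'C': c, 'G': g, 'T': t}
-- ===== Notes on version B (the rewrite author's own statement) =====
-- stated objective: alternative
-- what changed: Instead of materialising the columns with zip(*matrix) and rescanning each column eight times with tuple.count (upper and lower case for each of the four bases), B initialises four tally lists with the pseudocount 1 and makes one row-major pass over the matrix, classifying each character once and incrementing the matching tally in place.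
import Mathlib
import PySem

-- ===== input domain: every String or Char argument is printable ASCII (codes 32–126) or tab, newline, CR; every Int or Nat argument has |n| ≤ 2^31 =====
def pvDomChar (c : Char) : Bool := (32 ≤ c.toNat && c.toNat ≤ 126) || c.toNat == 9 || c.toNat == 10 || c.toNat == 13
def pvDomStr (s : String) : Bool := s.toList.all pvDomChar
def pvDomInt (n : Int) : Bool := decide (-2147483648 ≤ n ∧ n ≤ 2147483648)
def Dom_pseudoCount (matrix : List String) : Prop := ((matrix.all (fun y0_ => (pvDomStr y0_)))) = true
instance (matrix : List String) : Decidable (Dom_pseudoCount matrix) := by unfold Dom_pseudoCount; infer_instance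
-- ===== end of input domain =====

-- B replaces A's column-major quadruple .count rescans by one row-major pass that increments
-- four pre-initialised tally lists in place (objective: simpler single-pass table build).

-- ===== PORT A =====
-- zip(*matrix) = the first (min row length) columns; letter loop carries the literal
-- lowercase partner char since Python's letter.lower() on 'A'.. is that literal.
def pseudoCount (matrix : List String) : List (String × List Int) :=
  let rows := matrix.map String.toList
  let ncols := ((rows.map List.length).min?).getD 0
  let columns := (List.range ncols).map (fun j => rows.map (fun r => r.getD j ' '))
  let counts : PySem.Dict String (List Int) :=
    PySem.Dict.ofList [("A", []), ("C", []), ("G", []), ("T", [])]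
  let counts := columns.foldl (fun d col =>
      [("A", 'A', 'a'), ("C", 'C', 'c'), ("G", 'G', 'g'), ("T", 'T', 't')].foldl
        (fun (d : PySem.Dict String (List Int)) kul =>
          let col_count : Int := (col.count kul.2.1 : Int) + (col.count kul.2.2 : Int)
          d.insert kul.1 (d.getD kul.1 [] ++ [col_count + 1])) d) counts
  counts.items

-- ===== PORT B =====
-- l[j] += 1 for a j that is always in range
def pvBump (j : Nat) (l : List Int) : List Int := l.set j (l.getD j 0 + 1)

-- the body of B's inner loop: classify row[j] and bump the matching tally
def pvStep (row : List Char) (st : List Int × List Int × List Int × List Int)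
    (j : Nat) : List Int × List Int × List Int × List Int :=
  let ch := row.getD j ' '
  if ch = 'A' ∨ ch = 'a' then (pvBump j st.1, st.2.1, st.2.2.1, st.2.2.2)
  else if ch = 'C' ∨ ch = 'c' then (st.1, pvBump j st.2.1, st.2.2.1, st.2.2.2)
  else if ch = 'G' ∨ ch = 'g' then (st.1, st.2.1, pvBump j st.2.2.1, st.2.2.2)
  else if ch = 'T' ∨ ch = 't' then (st.1, st.2.1, st.2.2.1, pvBump j st.2.2.2)
  else st

-- the inner 'for j in range(ncols)' loop of one row
def pvStepRow (ncols : Nat) (st : List Int × List Int × List Int × List Int)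
    (row : List Char) : List Int × List Int × List Int × List Int :=
  (List.range ncols).foldl (pvStep row) st

def pseudoCount_alt (matrix : List String) : List (String × List Int) :=
  let rows := matrix.map String.toList
  let ncols := ((rows.map List.length).min?).getD 0
  let init := List.replicate ncols (1 : Int)
  let st := rows.foldl (pvStepRow ncols) (init, init, init, init)
  [("A", st.1), ("C", st.2.1), ("G", st.2.2.1), ("T", st.2.2.2)]

-- ===== PRECONDITION & SPEC =====
def Spec_pseudoCount (matrix : List String) (out : List (String × List Int)) : Prop := out = pseudoCount_alt matrix
instance (matrix : List String) (out : List (String × List Int)) : Decidable (Spec_pseudoCount matrix out) := by unfold Spec_pseudoCount; infer_instance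

-- ===== CLAIM (what is proved, stated in full; the proofs are below) =====
def Claim_equal_pseudoCount : Prop := ∀ (matrix : List String), Dom_pseudoCount matrix → Spec_pseudoCount matrix (pseudoCount matrix)

-- ===== LEMMAS AND PROOFS =====

-- the per-column value A appends for base (u, lo)
def pvColCnt (u lo : Char) (col : List Char) : Int :=
  (col.count u : Int) + (col.count lo : Int) + 1

-- B's effect on one tally list at one column index
def pvUpd (row : List Char) (u lo : Char) (l : List Int) (j : Nat) : List Int :=
  if row.getD j ' ' = u ∨ row.getD j ' ' = lo then pvBump j l else l

theorem A_inner (col : List Char) (la lc lg lt : List Int) :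
    ([("A", 'A', 'a'), ("C", 'C', 'c'), ("G", 'G', 'g'), ("T", 'T', 't')].foldl
        (fun (d : PySem.Dict String (List Int)) kul =>
          let col_count : Int := (col.count kul.2.1 : Int) + (col.count kul.2.2 : Int)
          d.insert kul.1 (d.getD kul.1 [] ++ [col_count + 1]))
        (PySem.Dict.ofList [("A", la), ("C", lc), ("G", lg), ("T", lt)]))
    = PySem.Dict.ofList [("A", la ++ [pvColCnt 'A' 'a' col]), ("C", lc ++ [pvColCnt 'C' 'c' col]),
        ("G", lg ++ [pvColCnt 'G' 'g' col]), ("T", lt ++ [pvColCnt 'T' 't' col])] := by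
  rfl

theorem items_ofList4 (la lc lg lt : List Int) :
    (PySem.Dict.ofList [("A", la), ("C", lc), ("G", lg), ("T", lt)]).items
      = [("A", la), ("C", lc), ("G", lg), ("T", lt)] := rfl

theorem A_fold (cols : List (List Char)) (la lc lg lt : List Int) :
    (cols.foldl (fun d col =>
        [("A", 'A', 'a'), ("C", 'C', 'c'), ("G", 'G', 'g'), ("T", 'T', 't')].foldl
          (fun (d : PySem.Dict String (List Int)) kul =>
            let col_count : Int := (col.count kul.2.1 : Int) + (col.count kul.2.2 : Int)
            d.insert kul.1 (d.getD kul.1 [] ++ [col_count + 1])) d)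
        (PySem.Dict.ofList [("A", la), ("C", lc), ("G", lg), ("T", lt)]))
    = PySem.Dict.ofList [("A", la ++ cols.map (pvColCnt 'A' 'a')),
        ("C", lc ++ cols.map (pvColCnt 'C' 'c')),
        ("G", lg ++ cols.map (pvColCnt 'G' 'g')),
        ("T", lt ++ cols.map (pvColCnt 'T' 't'))] := by
  induction cols generalizing la lc lg lt with
  | nil => simp
  | cons c cs ih =>
      rw [List.foldl_cons, A_inner, ih]
      simp

theorem pvStep_eq (row : List Char) (st : List Int × List Int × List Int × List Int) (j : Nat) :
    pvStep row st j = (pvUpd row 'A' 'a' st.1 j, pvUpd row 'C' 'c' st.2.1 j,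
      pvUpd row 'G' 'g' st.2.2.1 j, pvUpd row 'T' 't' st.2.2.2 j) := by
  simp only [pvStep, pvUpd]
  by_cases h1 : row.getD j ' ' = 'A' ∨ row.getD j ' ' = 'a'
  · have h2 : ¬(row.getD j ' ' = 'C' ∨ row.getD j ' ' = 'c') := by
      rcases h1 with h | h <;> rw [h] <;> decide
    have h3 : ¬(row.getD j ' ' = 'G' ∨ row.getD j ' ' = 'g') := by
      rcases h1 with h | h <;> rw [h] <;> decide
    have h4 : ¬(row.getD j ' ' = 'T' ∨ row.getD j ' ' = 't') := by
      rcases h1 with h | h <;> rw [h] <;> decide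
    simp only [if_pos h1, if_neg h2, if_neg h3, if_neg h4]
  · by_cases h2 : row.getD j ' ' = 'C' ∨ row.getD j ' ' = 'c'
    · have h3 : ¬(row.getD j ' ' = 'G' ∨ row.getD j ' ' = 'g') := by
        rcases h2 with h | h <;> rw [h] <;> decide
      have h4 : ¬(row.getD j ' ' = 'T' ∨ row.getD j ' ' = 't') := by
        rcases h2 with h | h <;> rw [h] <;> decide
      simp only [if_neg h1, if_pos h2, if_neg h3, if_neg h4]
    · by_cases h3 : row.getD j ' ' = 'G' ∨ row.getD j ' ' = 'g'
      · have h4 : ¬(row.getD j ' ' = 'T' ∨ row.getD j ' ' = 't') := by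
          rcases h3 with h | h <;> rw [h] <;> decide
        simp only [if_neg h1, if_neg h2, if_pos h3, if_neg h4]
      · by_cases h4 : row.getD j ' ' = 'T' ∨ row.getD j ' ' = 't'
        · simp only [if_neg h1, if_neg h2, if_neg h3, if_pos h4]
        · simp only [if_neg h1, if_neg h2, if_neg h3, if_neg h4]

theorem stepRow_decomp (ncols : Nat) (row : List Char)
    (st : List Int × List Int × List Int × List Int) :
    pvStepRow ncols st row
      = ((List.range ncols).foldl (pvUpd row 'A' 'a') st.1,
         (List.range ncols).foldl (pvUpd row 'C' 'c') st.2.1,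
         (List.range ncols).foldl (pvUpd row 'G' 'g') st.2.2.1,
         (List.range ncols).foldl (pvUpd row 'T' 't') st.2.2.2) := by
  unfold pvStepRow
  generalize (List.range ncols) = js
  induction js generalizing st with
  | nil => rfl
  | cons j js ih =>
      simp only [List.foldl_cons]
      rw [ih, pvStep_eq]

theorem rows_decomp (ncols : Nat) (rows : List (List Char))
    (st : List Int × List Int × List Int × List Int) :
    rows.foldl (pvStepRow ncols) st
      = (rows.foldl (fun acc r => (List.range ncols).foldl (pvUpd r 'A' 'a') acc) st.1,
         rows.foldl (fun acc r => (List.range ncols).foldl (pvUpd r 'C' 'c') acc) st.2.1,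
         rows.foldl (fun acc r => (List.range ncols).foldl (pvUpd r 'G' 'g') acc) st.2.2.1,
         rows.foldl (fun acc r => (List.range ncols).foldl (pvUpd r 'T' 't') acc) st.2.2.2) := by
  induction rows generalizing st with
  | nil => rfl
  | cons r rows ih =>
      rw [List.foldl_cons, stepRow_decomp, ih]
      rfl

theorem length_pvUpd (row : List Char) (u lo : Char) (l : List Int) (j : Nat) :
    (pvUpd row u lo l j).length = l.length := by
  unfold pvUpd pvBump; split <;> simp

theorem length_foldl_pvUpd (row : List Char) (u lo : Char) (js : List Nat) (l : List Int) :
    (js.foldl (pvUpd row u lo) l).length = l.length := by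
  induction js generalizing l with
  | nil => rfl
  | cons j js ih => rw [List.foldl_cons, ih, length_pvUpd]

theorem length_rows_fold (u lo : Char) (ncols : Nat) (rows : List (List Char)) (l : List Int) :
    (rows.foldl (fun acc r => (List.range ncols).foldl (pvUpd r u lo) acc) l).length
      = l.length := by
  induction rows generalizing l with
  | nil => rfl
  | cons r rows ih => rw [List.foldl_cons, ih, length_foldl_pvUpd]

theorem getD_pvUpd (row : List Char) (u lo : Char) (l : List Int) (j k : Nat) :
    (pvUpd row u lo l j).getD k 0
      = if j = k ∧ k < l.length ∧ (row.getD k ' ' = u ∨ row.getD k ' ' = lo)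
        then l.getD k 0 + 1 else l.getD k 0 := by
  unfold pvUpd pvBump
  by_cases hjk : j = k
  · subst hjk
    split_ifs with hc h2 <;>
      simp_all [List.getD_eq_getElem?_getD]
  · split_ifs with hc h2 <;>
      simp_all [List.getD_eq_getElem?_getD]

theorem getD_foldl_pvUpd (row : List Char) (u lo : Char) (js : List Nat) (hnd : js.Nodup)
    (l : List Int) (k : Nat) :
    (js.foldl (pvUpd row u lo) l).getD k 0
      = if k ∈ js ∧ k < l.length ∧ (row.getD k ' ' = u ∨ row.getD k ' ' = lo)
        then l.getD k 0 + 1 else l.getD k 0 := by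
  induction js generalizing l with
  | nil => simp
  | cons j js ih =>
      obtain ⟨hj, hnd'⟩ := List.nodup_cons.mp hnd
      rw [List.foldl_cons, ih hnd', length_pvUpd, getD_pvUpd]
      simp only [List.mem_cons]
      by_cases hD : j = k
      · subst hD
        by_cases hB : j < l.length <;>
          by_cases hC : row.getD j ' ' = u ∨ row.getD j ' ' = lo <;>
          simp_all
      · have hD2 : ¬k = j := fun h => hD h.symm
        by_cases hA : k ∈ js <;> by_cases hB : k < l.length <;>
          by_cases hC : row.getD k ' ' = u ∨ row.getD k ' ' = lo <;>
          simp_all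

theorem rows_fold_getD (u lo : Char) (hul : u ≠ lo) (ncols : Nat) (rows : List (List Char))
    (l : List Int) (hl : l.length = ncols) (k : Nat) (hk : k < ncols) :
    (rows.foldl (fun acc r => (List.range ncols).foldl (pvUpd r u lo) acc) l).getD k 0
      = l.getD k 0 + ((rows.map (fun r => r.getD k ' ')).count u : Int)
          + ((rows.map (fun r => r.getD k ' ')).count lo : Int) := by
  induction rows generalizing l with
  | nil => simp
  | cons r rows ih =>
      rw [List.foldl_cons, ih _ (by rw [length_foldl_pvUpd]; exact hl),
        getD_foldl_pvUpd _ _ _ _ List.nodup_range]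
      have hmem : k ∈ List.range ncols := List.mem_range.mpr hk
      have hkl : k < l.length := by rw [hl]; exact hk
      rw [List.map_cons, List.count_cons, List.count_cons]
      by_cases hcu : r.getD k ' ' = u
      · have hco : r.getD k ' ' ≠ lo := by rw [hcu]; exact hul
        rw [if_pos ⟨hmem, hkl, Or.inl hcu⟩]
        have e1 : (r.getD k ' ' == u) = true := beq_iff_eq.mpr hcu
        have e2 : (r.getD k ' ' == lo) = false := beq_eq_false_iff_ne.mpr hco
        simp_all
        ring
      · by_cases hco : r.getD k ' ' = lo
        · rw [if_pos ⟨hmem, hkl, Or.inr hco⟩]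
          have e1 : (r.getD k ' ' == u) = false := beq_eq_false_iff_ne.mpr hcu
          have e2 : (r.getD k ' ' == lo) = true := beq_iff_eq.mpr hco
          simp_all
          ring
        · rw [if_neg (by tauto)]
          have e1 : (r.getD k ' ' == u) = false := beq_eq_false_iff_ne.mpr hcu
          have e2 : (r.getD k ' ' == lo) = false := beq_eq_false_iff_ne.mpr hco
          simp_all

theorem component_eq (u lo : Char) (hul : u ≠ lo) (rows : List (List Char)) (ncols : Nat) :
    ((List.range ncols).map (fun j => rows.map (fun r => r.getD j ' '))).map (pvColCnt u lo)
      = rows.foldl (fun acc r => (List.range ncols).foldl (pvUpd r u lo) acc)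
          (List.replicate ncols 1) := by
  apply List.ext_getElem
  · simp [length_rows_fold]
  · intro k h1 h2
    have hk : k < ncols := by simpa using h1
    have hR := List.getD_eq_getElem
      (rows.foldl (fun acc r => (List.range ncols).foldl (pvUpd r u lo) acc)
        (List.replicate ncols 1)) 0 h2
    rw [← hR, rows_fold_getD u lo hul ncols rows _ (by simp) k hk]
    have hrep : (List.replicate ncols (1:Int)).getD k 0 = 1 := by
      simp [List.getD_eq_getElem?_getD, hk]
    rw [hrep]
    simp [pvColCnt]
    ring

-- ===== VERDICT (by name: the statement is the Claim_ definition above) =====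
theorem pseudoCount_spec : Claim_equal_pseudoCount := by
  intro matrix _
  show pseudoCount matrix = pseudoCount_alt matrix
  simp only [pseudoCount, pseudoCount_alt]
  rw [A_fold, rows_decomp, items_ofList4]
  simp only [List.nil_append]
  rw [component_eq 'A' 'a' (by decide), component_eq 'C' 'c' (by decide),
    component_eq 'G' 'g' (by decide), component_eq 'T' 't' (by decide)]
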